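-- pv_equiv track=rewrite | github.com/Sarvind1/sharepoint-list-manager | batch_with_permissions.py | generate_permissions_batch
-- ===== SOURCE A (Python) =====
-- def generate_permissions_batch(item_ids, user_permissions, base_url, role_id, batch_number=1):
--     """
--     Generate batch request for permission operations on existing items.
--
--     Args:
--         item_ids: List of SharePoint item IDs
--         user_permissions: List of dicts with 'add_users' and 'remove_users' keys
--         base_url: SharePoint list items endpoint
--         role_id: Role definition ID for adding permissions
--         batch_number: Batch sequence number
--     """
--     batch_id = f"batch_{batch_number:04d}"
--     changeset_id = f"changeset_{batch_number:04d}"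
--
--     output = []
--     output.append(f"--{batch_id}")
--     output.append(f"Content-Type: multipart/mixed; boundary={changeset_id}")
--     output.append("")
--
--     processed_count = 0
--
--     for item_id, perms in zip(item_ids, user_permissions):
--         add_users = perms.get('add_users', [])
--         remove_users = perms.get('remove_users', [])
--
--         # Only process if there are permissions to set
--         if not add_users and not remove_users:
--             continue
--
--         # Break inheritance if adding users
--         if add_users:
--             output.append(f"--{changeset_id}")
--             output.append("Content-Type: application/http")
--             output.append("Content-Transfer-Encoding: binary")
--             output.append("")
--             output.append(f"POST {base_url}({item_id})/breakroleinheritance(copyRoleAssignments=false) HTTP/1.1")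
--             output.append("Accept: application/json;odata=nometadata")
--             output.append("Content-Type: application/json;odata=verbose")
--             output.append("")
--             output.append("")
--
--             # Add each user
--             for user_id in add_users:
--                 output.append(f"--{changeset_id}")
--                 output.append("Content-Type: application/http")
--                 output.append("Content-Transfer-Encoding: binary")
--                 output.append("")
--                 output.append(f"POST {base_url}({item_id})/roleassignments/addroleassignment(principalid=@p,roledefid=@r)?@p={user_id}&@r={role_id} HTTP/1.1")
--                 output.append("Accept: application/json;odata=nometadata")
--                 output.append("Content-Type: application/json;odata=verbose")
--                 output.append("")
--                 output.append("")
--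
--         # Remove users
--         for user_id in remove_users:
--             output.append(f"--{changeset_id}")
--             output.append("Content-Type: application/http")
--             output.append("Content-Transfer-Encoding: binary")
--             output.append("")
--             output.append(f"POST {base_url}({item_id})/roleassignments/removeroleassignment(principalid=@p)?@p={user_id} HTTP/1.1")
--             output.append("Accept: application/json;odata=nometadata")
--             output.append("Content-Type: application/json;odata=verbose")
--             output.append("")
--             output.append("")
--
--         processed_count += 1
--
--     output.append(f"--{changeset_id}--")
--     output.append(f"--{batch_id}--")
--     output.append("")
--
--     return "\n".join(output), batch_id, processed_count
-- ===== SOURCE B (Python) =====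
-- def generate_permissions_batch(item_ids, user_permissions, base_url, role_id, batch_number=1):
--     batch_id = f"batch_{batch_number:04d}"
--     changeset_id = f"changeset_{batch_number:04d}"
--
--     def envelope(url):
--         return [f"--{changeset_id}",
--                 "Content-Type: application/http",
--                 "Content-Transfer-Encoding: binary",
--                 "",
--                 f"POST {url} HTTP/1.1",
--                 "Accept: application/json;odata=nometadata",
--                 "Content-Type: application/json;odata=verbose",
--                 "",
--                 ""]
--
--     # Phase 1: decide WHICH operations, in order (break-if-adds, adds, removes).
--     ops = []
--     processed_count = 0
--     for item_id, perms in zip(item_ids, user_permissions):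
--         add_users = perms.get('add_users', [])
--         remove_users = perms.get('remove_users', [])
--         if not add_users and not remove_users:
--             continue
--         if add_users:
--             ops.append(f"{base_url}({item_id})/breakroleinheritance(copyRoleAssignments=false)")
--             ops.extend(f"{base_url}({item_id})/roleassignments/addroleassignment(principalid=@p,roledefid=@r)?@p={u}&@r={role_id}"
--                        for u in add_users)
--         ops.extend(f"{base_url}({item_id})/roleassignments/removeroleassignment(principalid=@p)?@p={u}"
--                    for u in remove_users)
--         processed_count += 1
--
--     # Phase 2: render every operation in the one shared envelope.
--     output = ([f"--{batch_id}", f"Content-Type: multipart/mixed; boundary={changeset_id}", ""]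
--               + [line for url in ops for line in envelope(url)]
--               + [f"--{changeset_id}--", f"--{batch_id}--", ""])
--     return "\n".join(output), batch_id, processed_count
-- ===== Notes on version B (the rewrite author's own statement) =====
-- stated objective: simpler
-- what changed: B splits the work into two passes: one loop collects the ordered list of operation target URLs (break/add/remove) with the processed count, and a second pass renders every URL through one shared 9-line envelope, eliminating A's triply-duplicated header block.
import Mathlib
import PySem

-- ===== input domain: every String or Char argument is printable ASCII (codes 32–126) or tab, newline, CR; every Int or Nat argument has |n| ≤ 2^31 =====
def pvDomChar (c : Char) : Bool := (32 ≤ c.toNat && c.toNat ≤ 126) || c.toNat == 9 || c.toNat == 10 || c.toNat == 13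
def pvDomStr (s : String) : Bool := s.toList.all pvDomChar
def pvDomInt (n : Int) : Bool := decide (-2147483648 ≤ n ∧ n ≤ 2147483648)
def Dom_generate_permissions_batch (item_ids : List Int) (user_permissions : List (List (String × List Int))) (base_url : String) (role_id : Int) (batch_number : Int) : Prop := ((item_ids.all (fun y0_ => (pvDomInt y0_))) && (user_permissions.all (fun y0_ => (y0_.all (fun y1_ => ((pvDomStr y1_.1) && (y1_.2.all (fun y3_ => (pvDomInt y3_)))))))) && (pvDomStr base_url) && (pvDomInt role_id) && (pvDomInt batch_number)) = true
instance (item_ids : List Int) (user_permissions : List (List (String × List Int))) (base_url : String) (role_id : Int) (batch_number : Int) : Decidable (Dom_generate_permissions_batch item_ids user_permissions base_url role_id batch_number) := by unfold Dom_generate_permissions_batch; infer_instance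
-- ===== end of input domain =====

-- B builds the batch in two passes — collect the ordered operation URLs, then render each
-- through ONE shared envelope — replacing A's triply-duplicated header block (objective: simpler).

-- ===== PORT A =====
-- A's per-item loop body (appends full 9-line blocks inline, as A does)
def pvStepA (changeset_id base_url : String) (role_id : Int)
    (st : List String × Int) (p : Int × List (String × List Int)) : List String × Int :=
  let item_id := p.1
  let add_users := (p.2.lookup "add_users").getD []
  let remove_users := (p.2.lookup "remove_users").getD []
  if add_users.isEmpty && remove_users.isEmpty then st
  else
    let output := st.1
    let output :=
      if add_users.isEmpty then output
      else
        let output := output ++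
          ["--" ++ changeset_id,
           "Content-Type: application/http",
           "Content-Transfer-Encoding: binary",
           "",
           "POST " ++ (base_url ++ "(" ++ PySem.Int.toStr item_id ++ ")/breakroleinheritance(copyRoleAssignments=false)") ++ " HTTP/1.1",
           "Accept: application/json;odata=nometadata",
           "Content-Type: application/json;odata=verbose",
           "",
           ""]
        add_users.foldl (fun out u => out ++
          ["--" ++ changeset_id,
           "Content-Type: application/http",
           "Content-Transfer-Encoding: binary",
           "",
           "POST " ++ (base_url ++ "(" ++ PySem.Int.toStr item_id ++ ")/roleassignments/addroleassignment(principalid=@p,roledefid=@r)?@p=" ++ PySem.Int.toStr u ++ "&@r=" ++ PySem.Int.toStr role_id) ++ " HTTP/1.1",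
           "Accept: application/json;odata=nometadata",
           "Content-Type: application/json;odata=verbose",
           "",
           ""]) output
    let output := remove_users.foldl (fun out u => out ++
          ["--" ++ changeset_id,
           "Content-Type: application/http",
           "Content-Transfer-Encoding: binary",
           "",
           "POST " ++ (base_url ++ "(" ++ PySem.Int.toStr item_id ++ ")/roleassignments/removeroleassignment(principalid=@p)?@p=" ++ PySem.Int.toStr u) ++ " HTTP/1.1",
           "Accept: application/json;odata=nometadata",
           "Content-Type: application/json;odata=verbose",
           "",
           ""]) output
    (output, st.2 + 1)

def generate_permissions_batch (item_ids : List Int) (user_permissions : List (List (String × List Int))) (base_url : String) (role_id : Int) (batch_number : Int) : String × String × Int :=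
  let batch_id := "batch_" ++ PySem.Str.zfill (PySem.Int.toStr batch_number) 4
  let changeset_id := "changeset_" ++ PySem.Str.zfill (PySem.Int.toStr batch_number) 4
  let output : List String :=
    ["--" ++ batch_id,
     "Content-Type: multipart/mixed; boundary=" ++ changeset_id,
     ""]
  let st := (List.zip item_ids user_permissions).foldl
    (pvStepA changeset_id base_url role_id) (output, 0)
  let output := st.1 ++ ["--" ++ changeset_id ++ "--", "--" ++ batch_id ++ "--", ""]
  (PySem.Str.join "\n" output, batch_id, st.2)

-- ===== PORT B =====
-- the one shared per-operation envelope (Source B's `envelope`)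
def pvEnvelope (changeset_id : String) (url : String) : List String :=
  ["--" ++ changeset_id,
   "Content-Type: application/http",
   "Content-Transfer-Encoding: binary",
   "",
   "POST " ++ url ++ " HTTP/1.1",
   "Accept: application/json;odata=nometadata",
   "Content-Type: application/json;odata=verbose",
   "",
   ""]

-- B's phase-1 loop body: collect operation URLs only
def pvStepB (base_url : String) (role_id : Int)
    (st : List String × Int) (p : Int × List (String × List Int)) : List String × Int :=
  let item_id := p.1
  let add_users := (p.2.lookup "add_users").getD []
  let remove_users := (p.2.lookup "remove_users").getD []
  if add_users.isEmpty && remove_users.isEmpty then st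
  else
    let ops := st.1
    let ops :=
      if add_users.isEmpty then ops
      else (ops ++ [base_url ++ "(" ++ PySem.Int.toStr item_id ++ ")/breakroleinheritance(copyRoleAssignments=false)"])
           ++ add_users.map (fun u => base_url ++ "(" ++ PySem.Int.toStr item_id ++ ")/roleassignments/addroleassignment(principalid=@p,roledefid=@r)?@p=" ++ PySem.Int.toStr u ++ "&@r=" ++ PySem.Int.toStr role_id)
    let ops := ops ++ remove_users.map (fun u => base_url ++ "(" ++ PySem.Int.toStr item_id ++ ")/roleassignments/removeroleassignment(principalid=@p)?@p=" ++ PySem.Int.toStr u)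
    (ops, st.2 + 1)

def generate_permissions_batch_alt (item_ids : List Int) (user_permissions : List (List (String × List Int))) (base_url : String) (role_id : Int) (batch_number : Int) : String × String × Int :=
  let batch_id := "batch_" ++ PySem.Str.zfill (PySem.Int.toStr batch_number) 4
  let changeset_id := "changeset_" ++ PySem.Str.zfill (PySem.Int.toStr batch_number) 4
  let st := (List.zip item_ids user_permissions).foldl (pvStepB base_url role_id) ([], 0)
  let output :=
    (["--" ++ batch_id,
      "Content-Type: multipart/mixed; boundary=" ++ changeset_id,
      ""]
     ++ st.1.flatMap (pvEnvelope changeset_id))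
    ++ ["--" ++ changeset_id ++ "--", "--" ++ batch_id ++ "--", ""]
  (PySem.Str.join "\n" output, batch_id, st.2)

-- ===== PRECONDITION & SPEC =====
def Spec_generate_permissions_batch (item_ids : List Int) (user_permissions : List (List (String × List Int))) (base_url : String) (role_id : Int) (batch_number : Int) (out : String × String × Int) : Prop := out = generate_permissions_batch_alt item_ids user_permissions base_url role_id batch_number
instance (item_ids : List Int) (user_permissions : List (List (String × List Int))) (base_url : String) (role_id : Int) (batch_number : Int) (out : String × String × Int) : Decidable (Spec_generate_permissions_batch item_ids user_permissions base_url role_id batch_number out) := by unfold Spec_generate_permissions_batch; infer_instance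

-- ===== CLAIM (what is proved, stated in full; the proofs are below) =====
def Claim_equal_generate_permissions_batch : Prop := ∀ (item_ids : List Int) (user_permissions : List (List (String × List Int))) (base_url : String) (role_id : Int) (batch_number : Int), Dom_generate_permissions_batch item_ids user_permissions base_url role_id batch_number → Spec_generate_permissions_batch item_ids user_permissions base_url role_id batch_number (generate_permissions_batch item_ids user_permissions base_url role_id batch_number)

-- ===== LEMMAS AND PROOFS =====

-- appending a block per element is flat-mapping the block over the elements
theorem pv_foldl_append_flatMap {α β : Type} (f : α → List β) :
    ∀ (l : List α) (init : List β),
      l.foldl (fun out u => out ++ f u) init = init ++ l.flatMap f := by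
  intro l
  induction l with
  | nil => intro init; simp
  | cons x xs ih => intro init; simp [List.foldl_cons, ih]

-- one step of A's loop tracks one step of B's loop through the envelope rendering
theorem pv_step (cs bu : String) (rid : Int) (H ops : List String) (pc : Int)
    (p : Int × List (String × List Int)) :
    pvStepA cs bu rid (H ++ ops.flatMap (pvEnvelope cs), pc) p =
      (H ++ (pvStepB bu rid (ops, pc) p).1.flatMap (pvEnvelope cs),
       (pvStepB bu rid (ops, pc) p).2) := by
  unfold pvStepA pvStepB
  by_cases h : ((p.2.lookup "add_users").getD []).isEmpty && ((p.2.lookup "remove_users").getD []).isEmpty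
  · simp [h]
  · by_cases ha : ((p.2.lookup "add_users").getD []).isEmpty
    · simp only [ha, if_true]
      rw [pv_foldl_append_flatMap (fun u =>
        ["--" ++ cs, "Content-Type: application/http", "Content-Transfer-Encoding: binary", "",
         "POST " ++ (bu ++ "(" ++ PySem.Int.toStr p.1 ++ ")/roleassignments/removeroleassignment(principalid=@p)?@p=" ++ PySem.Int.toStr u) ++ " HTTP/1.1",
         "Accept: application/json;odata=nometadata", "Content-Type: application/json;odata=verbose", "", ""])]
      simp [List.flatMap_append, Function.comp, List.flatMap_map]
      split_ifs <;> simp [pvEnvelope, List.flatMap_append, Function.comp, List.flatMap_map, List.append_assoc]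
    · simp only [h, ha, Bool.false_eq_true, if_false]
      rw [pv_foldl_append_flatMap (fun u =>
        ["--" ++ cs, "Content-Type: application/http", "Content-Transfer-Encoding: binary", "",
         "POST " ++ (bu ++ "(" ++ PySem.Int.toStr p.1 ++ ")/roleassignments/addroleassignment(principalid=@p,roledefid=@r)?@p=" ++ PySem.Int.toStr u ++ "&@r=" ++ PySem.Int.toStr rid) ++ " HTTP/1.1",
         "Accept: application/json;odata=nometadata", "Content-Type: application/json;odata=verbose", "", ""]),
        pv_foldl_append_flatMap (fun u =>
        ["--" ++ cs, "Content-Type: application/http", "Content-Transfer-Encoding: binary", "",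
         "POST " ++ (bu ++ "(" ++ PySem.Int.toStr p.1 ++ ")/roleassignments/removeroleassignment(principalid=@p)?@p=" ++ PySem.Int.toStr u) ++ " HTTP/1.1",
         "Accept: application/json;odata=nometadata", "Content-Type: application/json;odata=verbose", "", ""])]
      simp [pvEnvelope, List.flatMap_append, Function.comp, List.flatMap_map, List.append_assoc]

-- the whole-fold invariant
theorem pv_fold (cs bu : String) (rid : Int) :
    ∀ (l : List (Int × List (String × List Int))) (H ops : List String) (pc : Int),
      l.foldl (pvStepA cs bu rid) (H ++ ops.flatMap (pvEnvelope cs), pc) =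
        (H ++ (l.foldl (pvStepB bu rid) (ops, pc)).1.flatMap (pvEnvelope cs),
         (l.foldl (pvStepB bu rid) (ops, pc)).2) := by
  intro l
  induction l with
  | nil => intro H ops pc; simp
  | cons x xs ih =>
    intro H ops pc
    rw [List.foldl_cons, List.foldl_cons, pv_step]
    exact ih H _ _

-- ===== VERDICT (by name: the statement is the Claim_ definition above) =====
theorem generate_permissions_batch_spec : Claim_equal_generate_permissions_batch := by
  intro item_ids user_permissions base_url role_id batch_number _
  unfold Spec_generate_permissions_batch generate_permissions_batch generate_permissions_batch_alt
  have h := pv_fold ("changeset_" ++ PySem.Str.zfill (PySem.Int.toStr batch_number) 4) base_url role_id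
    (List.zip item_ids user_permissions)
    ["--" ++ ("batch_" ++ PySem.Str.zfill (PySem.Int.toStr batch_number) 4),
     "Content-Type: multipart/mixed; boundary=" ++ ("changeset_" ++ PySem.Str.zfill (PySem.Int.toStr batch_number) 4),
     ""] [] 0
  simp only [List.flatMap_nil, List.append_nil] at h
  simp [h, List.append_assoc]
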